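-- pv_equiv track=rewrite | github.com/wenweny/Machine-Learning | bayesian/Beyesian_Classifier.py | seprateByClass
-- ===== SOURCE A (Python) =====
-- def seprateByClass(dataset):
--     """
--     :param dataset: train data with list type
--     :return: seprate_dict:separated data by class;
--             info_dict:Number of samples per class(category)
--     """
--     seprate_dict = {}
--     info_dict = {}
--     for vector in dataset:
--         if vector[-1] not in seprate_dict:
--             seprate_dict[vector[-1]] = []
--             info_dict[vector[-1]] = 0
--         seprate_dict[vector[-1]].append(vector)
--         info_dict[vector[-1]] += 1
--     return seprate_dict, info_dict
-- ===== SOURCE B (Python) =====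
-- def seprateByClass(dataset):
--     """Staged algorithm: collect the distinct labels in first-seen order,
--     then build each class group by filtering the whole dataset per label,
--     and read the counts off the group lengths."""
--     labels = []
--     for vector in dataset:
--         if vector[-1] not in labels:
--             labels.append(vector[-1])
--     seprate_dict = {lab: [v for v in dataset if v[-1] == lab] for lab in labels}
--     info_dict = {lab: len(rows) for lab, rows in seprate_dict.items()}
--     return seprate_dict, info_dict
-- ===== Notes on version B (the rewrite author's own statement) =====
-- stated objective: alternative
-- what changed: B replaces A's fused single-pass dict-grouping-with-counter by a staged algorithm: one pass collects the distinct labels in first-seen order, then each class group is built by filtering the whole dataset for that label, and counts are read off the group lengths.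
import Mathlib
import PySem

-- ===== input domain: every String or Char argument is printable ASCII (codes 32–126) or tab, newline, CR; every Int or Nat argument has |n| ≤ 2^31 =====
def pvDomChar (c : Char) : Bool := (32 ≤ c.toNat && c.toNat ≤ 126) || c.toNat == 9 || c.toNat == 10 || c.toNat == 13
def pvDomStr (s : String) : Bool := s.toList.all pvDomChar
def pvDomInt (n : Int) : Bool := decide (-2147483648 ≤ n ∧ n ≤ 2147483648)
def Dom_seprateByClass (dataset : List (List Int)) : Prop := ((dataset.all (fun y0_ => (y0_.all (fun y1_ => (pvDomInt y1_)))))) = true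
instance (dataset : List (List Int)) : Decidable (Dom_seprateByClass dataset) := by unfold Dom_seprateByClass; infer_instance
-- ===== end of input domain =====

-- B is a staged alternative to A's fused grouping loop: it collects the distinct labels
-- in first-seen order, builds each class group by filtering the dataset per label, and
-- reads counts off the group lengths.

-- ===== PORT A =====
def seprateByClass (dataset : List (List Int)) : (List (Int × List (List Int))) × (List (Int × Int)) :=
  let st :=
    dataset.foldl (fun st vector =>
      match PySem.List.pyGet? vector (-1) with
      | none => st   -- vector[-1] raises IndexError; excluded by Pre_
      | some k =>
        let st := if st.1.contains k then st else (st.1.insert k [], st.2.insert k 0)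
        (st.1.modify k [] (fun l => l ++ [vector]), st.2.modify k 0 (fun n => n + 1)))
      ((PySem.Dict.empty : PySem.Dict Int (List (List Int))), (PySem.Dict.empty : PySem.Dict Int Int))
  (st.1.items, st.2.items)

-- ===== PORT B =====
def seprateByClass_alt (dataset : List (List Int)) : (List (Int × List (List Int))) × (List (Int × Int)) :=
  let labels :=
    dataset.foldl (fun ls vector =>
      match PySem.List.pyGet? vector (-1) with
      | none => ls   -- vector[-1] raises IndexError; excluded by Pre_
      | some k => if ls.contains k then ls else ls ++ [k]) ([] : List Int)
  let sep := labels.map (fun lab => (lab, dataset.filter (fun v => PySem.List.pyGet? v (-1) == some lab)))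
  (sep, sep.map (fun p => (p.1, (p.2.length : Int))))

-- ===== PRECONDITION & SPEC =====
-- Pre_ excludes datasets containing an empty row: vector[-1] raises IndexError in both A and B there.
def Pre_seprateByClass (dataset : List (List Int)) : Prop := ∀ v ∈ dataset, v ≠ []
instance (dataset : List (List Int)) : Decidable (Pre_seprateByClass dataset) := by unfold Pre_seprateByClass; infer_instance

def pvWitness_seprateByClass : List (List Int) := [[1, 0], [2, 1], [3, 0]]

def Spec_seprateByClass (dataset : List (List Int)) (out : (List (Int × List (List Int))) × (List (Int × Int))) : Prop := out = seprateByClass_alt dataset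
instance (dataset : List (List Int)) (out : (List (Int × List (List Int))) × (List (Int × Int))) : Decidable (Spec_seprateByClass dataset out) := by unfold Spec_seprateByClass; infer_instance

-- ===== CLAIM (what is proved, stated in full; the proofs are below) =====
def Claim_equal_seprateByClass : Prop := ∀ (dataset : List (List Int)), Dom_seprateByClass dataset → Pre_seprateByClass dataset → Spec_seprateByClass dataset (seprateByClass dataset)

-- ===== LEMMAS AND PROOFS =====

-- the last element of a (nonempty, by Pre_) row, as a total function
def keyf (v : List Int) : Int := (PySem.List.pyGet? v (-1)).getD 0

theorem keyf_some {v : List Int} (h : v ≠ []) :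
    PySem.List.pyGet? v (-1) = some (keyf v) := by
  rw [PySem.List.pyGet?_neg_one] at *
  rcases hl : v.getLast? with _ | a
  · exact absurd (List.getLast?_eq_none_iff.mp hl) h
  · simp [keyf, PySem.List.pyGet?_neg_one, hl]

-- A's count dict as a function of its grouping dict: value ↦ its length
def mapLen (d : PySem.Dict Int (List (List Int))) : PySem.Dict Int Int :=
  ⟨d.items.map (fun p => (p.1, (p.2.length : Int)))⟩

theorem contains_mapLen (d : PySem.Dict Int (List (List Int))) (k : Int) :
    (mapLen d).contains k = d.contains k := by
  simp [mapLen, PySem.Dict.contains, List.any_map, Function.comp_def]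

theorem get?_mapLen (d : PySem.Dict Int (List (List Int))) (k : Int) :
    (mapLen d).get? k = (d.get? k).map (fun l => (l.length : Int)) := by
  obtain ⟨items⟩ := d
  induction items with
  | nil => rfl
  | cons p rest ih =>
    obtain ⟨a, b⟩ := p
    by_cases hp : (a == k) = true
    · simp [mapLen, PySem.Dict.get?_mk_cons, hp]
    · simp only [mapLen, List.map_cons, PySem.Dict.get?_mk_cons, hp, Bool.false_eq_true, if_false]
      simpa [mapLen] using ih

theorem getD_mapLen (d : PySem.Dict Int (List (List Int))) (k : Int) :
    (mapLen d).getD k 0 = ((d.getD k []).length : Int) := by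
  rw [PySem.Dict.getD_eq_get?_getD, PySem.Dict.getD_eq_get?_getD, get?_mapLen]
  cases d.get? k <;> rfl

theorem insert_mapLen (d : PySem.Dict Int (List (List Int))) (k : Int) (w : List (List Int)) :
    mapLen (d.insert k w) = (mapLen d).insert k (w.length : Int) := by
  simp only [PySem.Dict.insert, contains_mapLen]
  split
  · simp only [mapLen, List.map_map]
    refine congrArg PySem.Dict.mk (List.map_congr_left (fun p _ => ?_))
    by_cases h : (p.1 == k) = true <;> simp [Function.comp, h]
  · simp [mapLen]

theorem modify_mapLen (d : PySem.Dict Int (List (List Int))) (k : Int) (v : List Int) :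
    mapLen (d.modify k [] (fun l => l ++ [v])) = (mapLen d).modify k 0 (fun n => n + 1) := by
  simp only [PySem.Dict.modify, insert_mapLen, getD_mapLen, List.length_append,
    List.length_singleton]
  push_cast
  ring_nf

theorem sep_step (sep : PySem.Dict Int (List (List Int))) (k : Int) (v : List Int) :
    (if sep.contains k then sep else sep.insert k []).modify k [] (fun l => l ++ [v])
      = sep.modify k [] (fun l => l ++ [v]) := by
  by_cases h : sep.contains k = true
  · simp [h]
  · have hc : sep.contains k = false := by simpa using h
    simp [PySem.Dict.modify, PySem.Dict.getD_insert_self, PySem.Dict.insert_insert_self,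
      PySem.Dict.getD_of_not_contains, hc]

theorem info_step (info : PySem.Dict Int Int) (k : Int) (h : info.contains k = false) :
    (info.insert k 0).modify k 0 (fun n => n + 1) = info.modify k 0 (fun n => n + 1) := by
  simp [PySem.Dict.modify, PySem.Dict.getD_insert_self, PySem.Dict.insert_insert_self,
    PySem.Dict.getD_of_not_contains, h]

-- A's fused loop is the grouping loop paired with its length image
theorem fold_eq (ds : List (List Int)) (sep : PySem.Dict Int (List (List Int)))
    (info : PySem.Dict Int Int) (h : info = mapLen sep) :
    ds.foldl (fun st vector =>
      match PySem.List.pyGet? vector (-1) with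
      | none => st
      | some k =>
        let st := if st.1.contains k then st else (st.1.insert k [], st.2.insert k 0)
        (st.1.modify k [] (fun l => l ++ [vector]), st.2.modify k 0 (fun n => n + 1)))
      (sep, info)
    = (ds.foldl (fun d vector =>
        match PySem.List.pyGet? vector (-1) with
        | none => d
        | some k => d.modify k [] (fun l => l ++ [vector])) sep,
       mapLen (ds.foldl (fun d vector =>
        match PySem.List.pyGet? vector (-1) with
        | none => d
        | some k => d.modify k [] (fun l => l ++ [vector])) sep)) := by
  induction ds generalizing sep info with
  | nil => simp [h]
  | cons v ds ih =>
    rcases hk : PySem.List.pyGet? v (-1) with _ | k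
    · simp only [List.foldl_cons, hk]
      exact ih sep info h
    · have hsep' : (if sep.contains k = true then (sep, info)
            else (sep.insert k [], info.insert k 0)).1.modify k [] (fun l => l ++ [v])
          = sep.modify k [] (fun l => l ++ [v]) := by
        by_cases hc : sep.contains k = true
        · simp [hc]
        · simpa [hc] using sep_step sep k v
      have hinfo' : (if sep.contains k = true then (sep, info)
            else (sep.insert k [], info.insert k 0)).2.modify k 0 (fun n => n + 1)
          = info.modify k 0 (fun n => n + 1) := by
        by_cases hc : sep.contains k = true
        · simp [hc]
        · have hc' : info.contains k = false := by
            rw [h, contains_mapLen]; simpa using hc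
          simpa [hc] using info_step info k hc'
      simp only [List.foldl_cons, hk, hsep', hinfo']
      exact ih _ _ (by rw [h, modify_mapLen])

-- the grouping dict of A equals B's label-then-filter construction, under Pre_
theorem items_eq (dataset : List (List Int)) (hpre : ∀ v ∈ dataset, v ≠ []) :
    (dataset.foldl (fun d vector =>
        match PySem.List.pyGet? vector (-1) with
        | none => d
        | some k => d.modify k [] (fun l => l ++ [vector]))
      (PySem.Dict.empty : PySem.Dict Int (List (List Int)))).items
    = (dataset.foldl (fun ls vector =>
        match PySem.List.pyGet? vector (-1) with
        | none => ls
        | some k => if ls.contains k then ls else ls ++ [k]) ([] : List Int)).map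
        (fun lab => (lab, dataset.filter (fun v => PySem.List.pyGet? v (-1) == some lab))) := by
  -- replace both folds by keyf-based folds on members
  have hG : (dataset.foldl (fun d vector =>
        match PySem.List.pyGet? vector (-1) with
        | none => d
        | some k => d.modify k [] (fun l => l ++ [vector]))
      (PySem.Dict.empty : PySem.Dict Int (List (List Int))))
      = dataset.foldl (fun d v => d.modify (keyf v) [] (fun l => l ++ [v])) PySem.Dict.empty := by
    apply PySem.List.foldl_congr_mem
    intro acc v hv
    rw [keyf_some (hpre v hv)]
  have hL : (dataset.foldl (fun ls vector =>
        match PySem.List.pyGet? vector (-1) with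
        | none => ls
        | some k => if ls.contains k then ls else ls ++ [k]) ([] : List Int))
      = dataset.foldl (fun ls v => PySem.Set.add ls (keyf v)) [] := by
    apply PySem.List.foldl_congr_mem
    intro acc v hv
    rw [keyf_some (hpre v hv)]
    simp [PySem.Set.add]
  rw [hG, hL]
  set G := dataset.foldl (fun d v => d.modify (keyf v) [] (fun l => l ++ [v]))
      (PySem.Dict.empty : PySem.Dict Int (List (List Int))) with hGdef
  have hkeys : G.keys = PySem.Set.ofList (dataset.map keyf) := by
    rw [hGdef]
    rw [PySem.Dict.keys_foldl_modify_key dataset keyf [] (fun _ v l => l ++ [v])]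
    simp [PySem.Set.update, PySem.Set.ofList_eq_foldl, List.foldl_map]
  have hnodup : G.keys.Nodup := by
    rw [hGdef]
    exact PySem.Dict.nodup_keys_foldl_modify_key dataset keyf [] (fun _ v l => l ++ [v]) _ (by simp)
  have hlabels : dataset.foldl (fun ls v => PySem.Set.add ls (keyf v)) []
      = PySem.Set.ofList (dataset.map keyf) := by
    simp [PySem.Set.ofList_eq_foldl, List.foldl_map]
  have hgetD : ∀ k : Int, G.getD k [] = dataset.filter (fun v => keyf v == k) := by
    intro k
    have : G = (dataset.map (fun v => (keyf v, v))).foldl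
        (fun d p => d.modify p.1 [] (fun l => l ++ [p.2])) PySem.Dict.empty := by
      rw [hGdef, List.foldl_map]
    rw [this, PySem.Dict.getD_foldl_modify_append]
    simp [List.filter_map, Function.comp_def]
  have hfilter : ∀ k : Int,
      dataset.filter (fun v => PySem.List.pyGet? v (-1) == some k)
        = dataset.filter (fun v => keyf v == k) := by
    intro k
    apply List.filter_congr
    intro v hv
    rw [keyf_some (hpre v hv)]
    simp
  rw [PySem.Dict.items_eq_map_keys G hnodup [], hkeys, hlabels]
  apply List.map_congr_left
  intro k _
  rw [hgetD k, hfilter k]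

-- ===== VERDICT (by name: the statement is the Claim_ definition above) =====
theorem seprateByClass_spec : Claim_equal_seprateByClass := by
  intro dataset _ hpre
  show _ = _
  unfold seprateByClass seprateByClass_alt
  rw [fold_eq dataset PySem.Dict.empty PySem.Dict.empty rfl]
  simp only [mapLen, items_eq dataset hpre]
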